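-- pv_equiv track=rewrite | github.com/KoalaBotUK/KoalaBot | team_matchmaking_2.py | add_subs
-- ===== SOURCE A (Python) =====
-- def add_subs(teams, sub_list):
--     for sub in sub_list:
--         posn = pposn = 0
--         team = teams[0]
--         for x in teams:
--             if abs(sub[1] - x[1]) < abs(sub[1] - team[1]):
--                 pposn = posn
--                 team = x
--             posn += 1
--         teams[pposn][2].append(sub)
--     return teams
-- ===== SOURCE B (Python) =====
-- def add_subs(teams, sub_list):
--     if not teams:
--         return teams
--     first_idx = {}
--     for i, t in enumerate(teams):
--         if t[1] not in first_idx: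
--             first_idx[t[1]] = i
--     vals = sorted({t[1] for t in teams})
--     for sub in sub_list:
--         s = sub[1]
--         # binary search: j = number of distinct values < s
--         lo, hi = 0, len(vals)
--         while lo < hi:
--             mid = (lo + hi) // 2
--             if vals[mid] < s:
--                 lo = mid + 1
--             else:
--                 hi = mid
--         j = lo
--         if j == 0:
--             v = vals[0]
--         elif j == len(vals):
--             v = vals[j - 1]
--         else:
--             below, above = vals[j - 1], vals[j]
--             if above - s < s - below or (above - s == s - below and first_idx[above] < first_idx[below]):
--                 v = above
--             else:
--                 v = below
--         teams[first_idx[v]][2].append(sub)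
--     return teams
-- ===== Notes on version B (the rewrite author's own statement) =====
-- stated objective: faster
-- what changed: Instead of scanning all teams for each sub, B builds a first-index dict and a sorted list of distinct team values once, then binary-searches the nearest value per sub and breaks distance ties by the smaller first index.
import Mathlib
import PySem

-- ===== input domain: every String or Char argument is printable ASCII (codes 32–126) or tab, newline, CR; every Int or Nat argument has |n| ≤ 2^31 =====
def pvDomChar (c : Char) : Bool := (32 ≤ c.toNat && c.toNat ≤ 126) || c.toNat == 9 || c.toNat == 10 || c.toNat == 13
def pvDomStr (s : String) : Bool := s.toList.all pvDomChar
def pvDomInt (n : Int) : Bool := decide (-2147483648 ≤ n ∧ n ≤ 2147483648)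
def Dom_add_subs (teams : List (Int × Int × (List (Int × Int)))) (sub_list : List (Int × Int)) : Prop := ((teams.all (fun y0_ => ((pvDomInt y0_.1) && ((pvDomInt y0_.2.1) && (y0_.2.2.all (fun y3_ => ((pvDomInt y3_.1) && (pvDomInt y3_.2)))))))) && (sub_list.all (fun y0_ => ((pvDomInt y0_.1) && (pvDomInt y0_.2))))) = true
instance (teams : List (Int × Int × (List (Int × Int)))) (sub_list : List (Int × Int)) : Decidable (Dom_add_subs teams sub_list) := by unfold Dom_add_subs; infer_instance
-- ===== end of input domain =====

-- B replaces A's per-sub linear scan by a first-index dict plus a sorted list of distinct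
-- team values with a binary search per sub (faster); both Pythons mutate `teams` in place
-- identically (appending each sub to the chosen member list) — the theorems are about the
-- returned value.

-- ===== PORT A =====
-- inner loop of A: for x in teams, state (posn, pposn, team), starting at (0, 0, teams[0])
def pvPickA (s : Int) (ts : List (Int × Int × (List (Int × Int)))) : Nat :=
  match ts with
  | [] => 0   -- Python raises IndexError at teams[0]; excluded by Pre_add_subs
  | t0 :: _ =>
    (ts.foldl (fun (acc : Nat × Nat × (Int × Int × (List (Int × Int)))) x =>
        if |s - x.2.1| < |s - acc.2.2.2.1| then (acc.1 + 1, acc.1, x)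
        else (acc.1 + 1, acc.2.1, acc.2.2)) (0, 0, t0)).2.1

def add_subs (teams : List (Int × Int × (List (Int × Int)))) (sub_list : List (Int × Int)) : List (Int × Int × (List (Int × Int))) :=
  sub_list.foldl (fun ts sub =>
    ts.modify (pvPickA sub.2 ts) (fun t => (t.1, t.2.1, t.2.2 ++ [sub]))) teams

-- ===== PORT B =====
-- Source B's hand-written binary search; the extra fuel argument (hi - lo bounds the number
-- of loop iterations) only makes the while loop structurally recursive, it never changes
-- the result
def pvBsearchGo (vals : List Int) (s : Int) : Nat → Nat → Nat → Nat
  | 0, lo, _ => lo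
  | fuel + 1, lo, hi =>
    if lo < hi then
      let mid := (lo + hi) / 2
      if vals.getD mid 0 < s then pvBsearchGo vals s fuel (mid + 1) hi
      else pvBsearchGo vals s fuel lo mid
    else lo

def pvBsearch (vals : List Int) (s : Int) : Nat :=
  pvBsearchGo vals s vals.length 0 vals.length

-- per-sub choice of Source B: nearest distinct value, ties to the smaller first index
def pvPickB (firstIdx : PySem.Dict Int Int) (vals : List Int) (s : Int) : Nat :=
  let j := pvBsearch vals s
  let v :=
    if j = 0 then vals.getD 0 0
    else if j = vals.length then vals.getD (j - 1) 0
    else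
      let below := vals.getD (j - 1) 0
      let above := vals.getD j 0
      if above - s < s - below ∨ (above - s = s - below ∧ firstIdx.getD above 0 < firstIdx.getD below 0)
      then above else below
  (firstIdx.getD v 0).toNat

def add_subs_alt (teams : List (Int × Int × (List (Int × Int)))) (sub_list : List (Int × Int)) : List (Int × Int × (List (Int × Int))) :=
  if teams = [] then teams
  else
    let firstIdx : PySem.Dict Int Int :=
      (PySem.List.enumerate teams 0).foldl
        (fun d it => if d.contains it.2.2.1 then d else d.insert it.2.2.1 it.1) PySem.Dict.empty
    let vals : List Int :=
      PySem.List.sorted (PySem.Set.ofList (teams.map (fun t => t.2.1))) (fun v => v) false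
    sub_list.foldl (fun ts sub =>
      ts.modify (pvPickB firstIdx vals sub.2) (fun t => (t.1, t.2.1, t.2.2 ++ [sub]))) teams

-- ===== PRECONDITION & SPEC =====
-- Pre_ excludes exactly the inputs where A raises: teams == [] with a nonempty sub_list (IndexError at teams[0]).
def Pre_add_subs (teams : List (Int × Int × (List (Int × Int)))) (sub_list : List (Int × Int)) : Prop :=
  teams ≠ [] ∨ sub_list = []
instance (teams : List (Int × Int × (List (Int × Int)))) (sub_list : List (Int × Int)) : Decidable (Pre_add_subs teams sub_list) := by unfold Pre_add_subs; infer_instance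

def pvWitness_add_subs : (List (Int × Int × (List (Int × Int)))) × (List (Int × Int)) :=
  ([(1, 5, [(7, 7)])], [(2, 3), (3, 8)])

def Spec_add_subs (teams : List (Int × Int × (List (Int × Int)))) (sub_list : List (Int × Int)) (out : List (Int × Int × (List (Int × Int)))) : Prop := out = add_subs_alt teams sub_list
instance (teams : List (Int × Int × (List (Int × Int)))) (sub_list : List (Int × Int)) (out : List (Int × Int × (List (Int × Int)))) : Decidable (Spec_add_subs teams sub_list out) := by unfold Spec_add_subs; infer_instance

-- ===== CLAIM (what is proved, stated in full; the proofs are below) =====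
def Claim_equal_add_subs : Prop := ∀ (teams : List (Int × Int × (List (Int × Int)))) (sub_list : List (Int × Int)), Dom_add_subs teams sub_list → Pre_add_subs teams sub_list → Spec_add_subs teams sub_list (add_subs teams sub_list)

-- ===== LEMMAS AND PROOFS =====

-- the value a team is matched by
def pvVal (t : Int × Int × (List (Int × Int))) : Int := t.2.1

-- the index A's scan returns: the first index of `vs` at minimal distance from s
def pvIsPick (s : Int) (vs : List Int) (p : Nat) : Prop :=
  ∃ _ : p < vs.length,
    (∀ j (hj : j < vs.length), |s - vs[p]'(by omega)| ≤ |s - vs[j]|) ∧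
    (∀ j (hj : j < vs.length), j < p → |s - vs[p]'(by omega)| < |s - vs[j]|)

lemma pvIsPick_unique {s : Int} {vs : List Int} {p q : Nat}
    (hp : pvIsPick s vs p) (hq : pvIsPick s vs q) : p = q := by
  obtain ⟨hpl, hpmin, hpfirst⟩ := hp
  obtain ⟨hql, hqmin, hqfirst⟩ := hq
  by_contra hne
  rcases Nat.lt_or_ge p q with h | h
  · exact absurd (hpmin q hql) (not_le.mpr (hqfirst p hpl h))
  · have h' : q < p := by omega
    exact absurd (hqmin p hpl) (not_le.mpr (hpfirst q hql h'))

lemma pvScanA (s : Int) (ts : List (Int × Int × (List (Int × Int)))) :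
    ∀ (l pref : List (Int × Int × (List (Int × Int)))), ts = pref ++ l →
    ∀ (pposn : Nat) (team : Int × Int × (List (Int × Int))),
    ts[pposn]? = some team →
    (∀ t ∈ pref, |s - team.2.1| ≤ |s - t.2.1|) →
    (∀ j (hj : j < ts.length), j < pposn → |s - team.2.1| < |s - (ts[j]'hj).2.1|) →
    (ts[(l.foldl (fun (acc : Nat × Nat × (Int × Int × (List (Int × Int)))) x =>
        if |s - x.2.1| < |s - acc.2.2.2.1| then (acc.1 + 1, acc.1, x)
        else (acc.1 + 1, acc.2.1, acc.2.2)) (pref.length, pposn, team)).2.1]? =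
      some (l.foldl (fun (acc : Nat × Nat × (Int × Int × (List (Int × Int)))) x =>
        if |s - x.2.1| < |s - acc.2.2.2.1| then (acc.1 + 1, acc.1, x)
        else (acc.1 + 1, acc.2.1, acc.2.2)) (pref.length, pposn, team)).2.2) ∧
    (∀ t ∈ ts, |s - ((l.foldl (fun (acc : Nat × Nat × (Int × Int × (List (Int × Int)))) x =>
        if |s - x.2.1| < |s - acc.2.2.2.1| then (acc.1 + 1, acc.1, x)
        else (acc.1 + 1, acc.2.1, acc.2.2)) (pref.length, pposn, team)).2.2).2.1| ≤ |s - t.2.1|) ∧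
    (∀ j (hj : j < ts.length), j < (l.foldl (fun (acc : Nat × Nat × (Int × Int × (List (Int × Int)))) x =>
        if |s - x.2.1| < |s - acc.2.2.2.1| then (acc.1 + 1, acc.1, x)
        else (acc.1 + 1, acc.2.1, acc.2.2)) (pref.length, pposn, team)).2.1 →
      |s - ((l.foldl (fun (acc : Nat × Nat × (Int × Int × (List (Int × Int)))) x =>
        if |s - x.2.1| < |s - acc.2.2.2.1| then (acc.1 + 1, acc.1, x)
        else (acc.1 + 1, acc.2.1, acc.2.2)) (pref.length, pposn, team)).2.2).2.1| < |s - (ts[j]'hj).2.1|) := by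
  intro l
  induction l with
  | nil =>
    intro pref hsplit pposn team h1 h2 h3
    refine ⟨h1, ?_, h3⟩
    intro t ht
    exact h2 t (by rw [hsplit] at ht; simpa using ht)
  | cons x l ih =>
    intro pref hsplit pposn team h1 h2 h3
    subst hsplit
    have hxmem : (pref ++ x :: l)[pref.length]? = some x := by
      rw [List.getElem?_append_right (le_refl _)]
      simp
    have hprefget : ∀ j (hj : j < (pref ++ x :: l).length), j < pref.length →
        ((pref ++ x :: l)[j]'hj) ∈ pref := by
      intro j hj hjp
      rw [List.getElem_append_left hjp]
      exact List.getElem_mem _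
    by_cases hx : |s - x.2.1| < |s - team.2.1|
    · have := ih (pref ++ [x]) (by simp) pref.length x
        (by simpa using hxmem)
        (by
          intro t ht
          rcases List.mem_append.mp ht with ht | ht
          · exact le_of_lt (lt_of_lt_of_le hx (h2 t ht))
          · simp at ht; subst ht; exact le_refl _)
        (by
          intro j hj hjp
          exact lt_of_lt_of_le hx (h2 _ (hprefget j hj hjp)))
      simp only [List.foldl_cons, hx, if_pos, List.length_append, List.length_cons,
        List.length_nil] at this ⊢
      convert this using 3 <;> omega
    · have := ih (pref ++ [x]) (by simp) pposn team h1
        (by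
          intro t ht
          rcases List.mem_append.mp ht with ht | ht
          · exact h2 t ht
          · simp at ht; subst ht; exact le_of_not_gt hx)
        h3
      simp only [List.foldl_cons, hx, if_neg, List.length_append, List.length_cons,
        List.length_nil] at this ⊢
      convert this using 3 <;> omega

lemma pvPickA_isPick (s : Int) (ts : List (Int × Int × (List (Int × Int)))) (hne : ts ≠ []) :
    pvIsPick s (ts.map pvVal) (pvPickA s ts) := by
  obtain ⟨t0, rest, rfl⟩ := List.exists_cons_of_ne_nil hne
  have h := pvScanA s (t0 :: rest) (t0 :: rest) [] rfl 0 t0 (by simp) (by simp)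
    (by intro j hj h0; exact absurd h0 (Nat.not_lt_zero j))
  obtain ⟨h1, h2, h3⟩ := h
  unfold pvPickA
  simp only [List.length_nil] at h1 h2 h3
  have hlt := (List.getElem?_eq_some_iff.mp h1).1
  have hget := (List.getElem?_eq_some_iff.mp h1).2
  refine ⟨by simpa using hlt, ?_, ?_⟩
  · intro j hj
    simp only [List.length_map] at hj
    simp only [List.getElem_map, pvVal]
    rw [hget]
    exact h2 _ (List.getElem_mem hj)
  · intro j hj hjp
    simp only [List.length_map] at hj
    simp only [List.getElem_map, pvVal]
    rw [hget]
    exact h3 j hj hjp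

-- characterisation of Source B's first_idx dict
lemma pvBuildIdx (l : List (Int × Int × (List (Int × Int)))) :
    ∀ (k : Int) (d : PySem.Dict Int Int) (v : Int),
    ((PySem.List.enumerate l k).foldl
        (fun d it => if d.contains it.2.2.1 then d else d.insert it.2.2.1 it.1) d).get? v =
      if d.contains v then d.get? v
      else (PySem.List.index? (l.map pvVal) v).map (fun n => k + (n : Int)) := by
  induction l with
  | nil =>
    intro k d v
    rw [PySem.List.enumerate_nil]
    simp only [List.foldl_nil, List.map_nil]
    by_cases h : d.contains v
    · simp [h]
    · simp [h, (PySem.Dict.get?_eq_none_iff_contains d v).mpr (by simp [h]),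
        PySem.List.index?]
  | cons x l ih =>
    intro k d v
    rw [PySem.List.enumerate_cons]
    simp only [List.foldl_cons, List.map_cons, pvVal]
    by_cases hc : d.contains x.2.1
    · rw [if_pos hc, ih]
      by_cases hv : v = x.2.1
      · subst hv; simp [hc]
      · by_cases hdv : d.contains v
        · simp [hdv]
        · rw [if_neg hdv, if_neg hdv]
          rw [PySem.List.index?_cons_of_ne _ (Ne.symm hv)]
          cases PySem.List.index? (List.map pvVal l) v <;> simp <;> omega
    · rw [if_neg hc, ih]
      by_cases hv : v = x.2.1
      · subst hv
        rw [if_pos (by simp [PySem.Dict.contains_insert])]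
        rw [PySem.Dict.get?_insert_self]
        rw [if_neg hc]
        rw [PySem.List.index?_cons_self]
        simp
      · have hcins : (d.insert x.2.1 k).contains v = d.contains v := by
          simp [PySem.Dict.contains_insert, hv]
        rw [hcins]
        by_cases hdv : d.contains v
        · rw [if_pos hdv, if_pos hdv, PySem.Dict.get?_insert_of_ne _ _ hv]
        · rw [if_neg hdv, if_neg hdv, PySem.List.index?_cons_of_ne _ (Ne.symm hv)]
          cases PySem.List.index? (List.map pvVal l) v <;> simp <;> omega

-- Source B's binary search: invariant form
lemma pvBsearchGo_inv (vals : List Int) (s : Int) (hsort : vals.Pairwise (· < ·)) :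
    ∀ (n lo hi : Nat), hi - lo ≤ n → lo ≤ hi → hi ≤ vals.length →
    (∀ i (hi' : i < vals.length), i < lo → vals[i] < s) →
    (∀ i (hi' : i < vals.length), hi ≤ i → s ≤ vals[i]) →
    (pvBsearchGo vals s n lo hi ≤ vals.length ∧
      (∀ i (hi' : i < vals.length), i < pvBsearchGo vals s n lo hi → vals[i] < s) ∧
      (∀ i (hi' : i < vals.length), pvBsearchGo vals s n lo hi ≤ i → s ≤ vals[i])) := by
  intro n
  induction n with
  | zero =>
    intro lo hi hn hlh hhl hbelow habove
    have : lo = hi := by omega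
    subst this
    rw [pvBsearchGo]
    exact ⟨by omega, hbelow, habove⟩
  | succ n ihn =>
    intro lo hi hn hlh hhl hbelow habove
    rw [pvBsearchGo]
    by_cases h : lo < hi
    · rw [if_pos h]
      have hmidlt : (lo + hi) / 2 < vals.length := by omega
      have hmono := List.pairwise_iff_getElem.mp hsort
      by_cases hv : vals.getD ((lo + hi) / 2) 0 < s
      · rw [if_pos hv]
        rw [List.getD_eq_getElem vals 0 hmidlt] at hv
        refine ihn ((lo + hi) / 2 + 1) hi (by omega) (by omega) hhl ?_ habove
        intro i hi' hilt
        rcases Nat.lt_or_ge i ((lo + hi) / 2) with hc | hc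
        · exact lt_trans (hmono i _ hi' hmidlt hc) hv
        · have : i = (lo + hi) / 2 := by omega
          subst this; exact hv
      · rw [if_neg hv]
        rw [List.getD_eq_getElem vals 0 hmidlt] at hv
        refine ihn lo ((lo + hi) / 2) (by omega) (by omega) (by omega) hbelow ?_
        intro i hi' hge
        rcases Nat.eq_or_lt_of_le hge with hc | hc
        · subst hc; exact le_of_not_gt hv
        · exact le_trans (le_of_not_gt hv) (le_of_lt (hmono _ i hmidlt hi' hc))
    · rw [if_neg h]
      have heq : lo = hi := by omega
      subst heq
      exact ⟨by omega, hbelow, habove⟩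

-- first occurrence index of a value
def pvFirst (vs : List Int) (v : Int) : Nat := (PySem.List.index? vs v).getD 0

lemma pvFirst_spec {vs : List Int} {v : Int} (h : v ∈ vs) :
    ∃ hlt : pvFirst vs v < vs.length,
      vs[pvFirst vs v] = v ∧ ∀ j (hj : j < vs.length), j < pvFirst vs v → vs[j] ≠ v := by
  have hsome : (PySem.List.index? vs v).isSome = true :=
    (PySem.List.index?_isSome_iff vs v).mpr h
  obtain ⟨k, hk⟩ := Option.isSome_iff_exists.mp hsome
  obtain ⟨hlt, hget, hfirst⟩ := PySem.List.getElem_of_index?_eq_some hk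
  have hpv : pvFirst vs v = k := by unfold pvFirst; rw [hk]; rfl
  rw [hpv]
  exact ⟨hlt, hget, fun j hj hjk => hfirst j hjk⟩

lemma pvFirst_le {vs : List Int} {v : Int} {k : Nat} (hk : k < vs.length) (he : vs[k] = v) :
    pvFirst vs v ≤ k := by
  have hmem : v ∈ vs := he ▸ List.getElem_mem hk
  obtain ⟨hlt, hget, hfirst⟩ := pvFirst_spec hmem
  by_contra hcon
  exact hfirst k hk (by omega) he

-- the per-sub choice of Source B picks the first index at minimal distance
lemma pvPickB_spec (fi : PySem.Dict Int Int) (vals vs : List Int) (s : Int)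
    (hsort : vals.Pairwise (· < ·))
    (hvmem : ∀ w, w ∈ vals ↔ w ∈ vs)
    (hfi : ∀ w ∈ vs, fi.getD w 0 = ((pvFirst vs w : Nat) : Int))
    (hvsne : vs ≠ []) :
    pvIsPick s vs (pvPickB fi vals s) := by
  have hm : ∀ i1 i2 (h1 : i1 < vals.length) (h2 : i2 < vals.length), i1 < i2 →
      vals[i1] < vals[i2] := fun i1 i2 h1 h2 h12 =>
    List.pairwise_iff_getElem.mp hsort i1 i2 h1 h2 h12
  have hinj : ∀ i1 i2 (h1 : i1 < vals.length) (h2 : i2 < vals.length),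
      vals[i1] = vals[i2] → i1 = i2 := by
    intro i1 i2 h1 h2 he
    rcases Nat.lt_trichotomy i1 i2 with h | h | h
    · exact absurd he (ne_of_lt (hm i1 i2 h1 h2 h))
    · exact h
    · exact absurd he.symm (ne_of_lt (hm i2 i1 h2 h1 h))
  have hvalsne : vals ≠ [] := by
    intro hnil
    obtain ⟨w, hw⟩ := List.exists_mem_of_ne_nil vs hvsne
    exact absurd ((hvmem w).mpr hw) (by simp [hnil])
  have hlen : 0 < vals.length := List.length_pos_iff.mpr hvalsne
  obtain ⟨hjle, hjlt, hjge⟩ := pvBsearchGo_inv vals s hsort vals.length 0 vals.length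
    (by omega) (by omega) (le_refl _)
    (by intro i hi' h0; exact absurd h0 (Nat.not_lt_zero i))
    (by intro i hi' hge; omega)
  simp only [pvPickB, pvBsearch]
  set j := pvBsearchGo vals s vals.length 0 vals.length with hj
  set V : Int :=
    (if j = 0 then vals.getD 0 0
     else if j = vals.length then vals.getD (j - 1) 0
     else
       if vals.getD j 0 - s < s - vals.getD (j - 1) 0 ∨
          (vals.getD j 0 - s = s - vals.getD (j - 1) 0 ∧
            fi.getD (vals.getD j 0) 0 < fi.getD (vals.getD (j - 1) 0) 0)
       then vals.getD j 0 else vals.getD (j - 1) 0) with hV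
  have hkey : V ∈ vals ∧ (∀ w ∈ vals, |s - V| ≤ |s - w|) ∧
      (∀ w ∈ vals, w ≠ V → |s - w| = |s - V| → pvFirst vs V < pvFirst vs w) := by
    by_cases hj0 : j = 0
    · -- every value is ≥ s; V is the smallest value
      have hVv : V = vals[0] := by rw [hV, if_pos hj0]; exact List.getD_eq_getElem vals 0 hlen
      have hge : ∀ i (hi : i < vals.length), s ≤ vals[i] := by
        intro i hi; exact hjge i hi (by omega)
      have h0le : ∀ i (hi : i < vals.length), vals[0] ≤ vals[i] := by
        intro i hi
        rcases Nat.eq_zero_or_pos i with h | h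
        · subst h; exact le_refl _
        · exact le_of_lt (hm 0 i hlen hi h)
      refine ⟨hVv ▸ List.getElem_mem hlen, ?_, ?_⟩
      · intro w hw
        obtain ⟨i, hi, rfl⟩ := List.mem_iff_getElem.mp hw
        have e1 : |s - vals[0]| = vals[0] - s := by
          rw [abs_sub_comm]; exact abs_of_nonneg (by have := hge 0 hlen; omega)
        have e2 : |s - vals[i]| = vals[i] - s := by
          rw [abs_sub_comm]; exact abs_of_nonneg (by have := hge i hi; omega)
        rw [hVv, e1, e2]
        have := h0le i hi; omega
      · intro w hw hwne htie
        obtain ⟨i, hi, rfl⟩ := List.mem_iff_getElem.mp hw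
        have e1 : |s - vals[0]| = vals[0] - s := by
          rw [abs_sub_comm]; exact abs_of_nonneg (by have := hge 0 hlen; omega)
        have e2 : |s - vals[i]| = vals[i] - s := by
          rw [abs_sub_comm]; exact abs_of_nonneg (by have := hge i hi; omega)
        rw [hVv, e1, e2] at htie
        have : vals[i] = vals[0] := by omega
        have : i = 0 := hinj i 0 hi hlen this
        subst this
        exact absurd hVv.symm hwne
    · by_cases hjn : j = vals.length
      · -- every value is < s; V is the largest value
        have hj1 : j - 1 < vals.length := by omega
        have hVv : V = vals[j - 1] := by
          rw [hV, if_neg hj0, if_pos hjn]; exact List.getD_eq_getElem vals 0 hj1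
        have hlt : ∀ i (hi : i < vals.length), vals[i] < s := by
          intro i hi; exact hjlt i hi (by omega)
        have hle : ∀ i (hi : i < vals.length), vals[i] ≤ vals[j - 1] := by
          intro i hi
          rcases Nat.lt_or_ge i (j - 1) with h | h
          · exact le_of_lt (hm i (j - 1) hi hj1 h)
          · have : i = j - 1 := by omega
            subst this; exact le_refl _
        refine ⟨hVv ▸ List.getElem_mem hj1, ?_, ?_⟩
        · intro w hw
          obtain ⟨i, hi, rfl⟩ := List.mem_iff_getElem.mp hw
          have e1 : |s - vals[j - 1]| = s - vals[j - 1] :=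
            abs_of_nonneg (by have := hlt (j-1) hj1; omega)
          have e2 : |s - vals[i]| = s - vals[i] :=
            abs_of_nonneg (by have := hlt i hi; omega)
          rw [hVv, e1, e2]
          have := hle i hi; omega
        · intro w hw hwne htie
          obtain ⟨i, hi, rfl⟩ := List.mem_iff_getElem.mp hw
          have e1 : |s - vals[j - 1]| = s - vals[j - 1] :=
            abs_of_nonneg (by have := hlt (j-1) hj1; omega)
          have e2 : |s - vals[i]| = s - vals[i] :=
            abs_of_nonneg (by have := hlt i hi; omega)
          rw [hVv, e1, e2] at htie
          have : vals[i] = vals[j - 1] := by omega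
          have : i = j - 1 := hinj i (j - 1) hi hj1 this
          subst this
          exact absurd hVv.symm hwne
      · -- 0 < j < vals.length: the two neighbours of s
        have hjlt' : j < vals.length := by omega
        have hj1 : j - 1 < vals.length := by omega
        have hbel : vals[j - 1] < s := hjlt (j - 1) hj1 (by omega)
        have hab : s ≤ vals[j] := hjge j hjlt' (le_refl _)
        have hbelne : vals[j - 1] ≠ vals[j] := ne_of_lt (hm (j-1) j hj1 hjlt' (by omega))
        have hgb : vals.getD (j - 1) 0 = vals[j - 1] := List.getD_eq_getElem vals 0 hj1
        have hga : vals.getD j 0 = vals[j] := List.getD_eq_getElem vals 0 hjlt'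
        have hablow : ∀ i (hi : i < vals.length), j ≤ i → vals[j] - s ≤ |s - vals[i]| := by
          intro i hi hji
          rw [abs_sub_comm, abs_of_nonneg (by have := hjge i hi hji; omega)]
          rcases Nat.eq_or_lt_of_le hji with h | h
          · subst h; omega
          · have := hm j i hjlt' hi h; omega
        have hbelow : ∀ i (hi : i < vals.length), i < j → s - vals[j - 1] ≤ |s - vals[i]| := by
          intro i hi hij
          rw [abs_of_nonneg (by have := hjlt i hi hij; omega)]
          rcases Nat.lt_or_ge i (j - 1) with h | h
          · have := hm i (j-1) hi hj1 h; omega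
          · have : i = j - 1 := by omega
            subst this; omega
        have habove_mem : vals[j] ∈ vs := (hvmem _).mp (List.getElem_mem hjlt')
        have hbelow_mem : vals[j - 1] ∈ vs := (hvmem _).mp (List.getElem_mem hj1)
        have hfia := hfi _ habove_mem
        have hfib := hfi _ hbelow_mem
        have hfine : pvFirst vs vals[j] ≠ pvFirst vs vals[j - 1] := by
          intro he
          obtain ⟨hl1, hg1, _⟩ := pvFirst_spec habove_mem
          obtain ⟨hl2, hg2, _⟩ := pvFirst_spec hbelow_mem
          simp only [he] at hg1
          exact hbelne (hg2.symm.trans hg1)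
        by_cases hC : vals.getD j 0 - s < s - vals.getD (j - 1) 0 ∨
            (vals.getD j 0 - s = s - vals.getD (j - 1) 0 ∧
              fi.getD (vals.getD j 0) 0 < fi.getD (vals.getD (j - 1) 0) 0)
        · have hVv : V = vals[j] := by rw [hV, if_neg hj0, if_neg hjn, if_pos hC, hga]
          rw [hga, hgb, hfia, hfib] at hC
          have hVd : |s - V| = vals[j] - s := by
            rw [hVv, abs_sub_comm, abs_of_nonneg (by omega)]
          have hdle : vals[j] - s ≤ s - vals[j - 1] := by
            rcases hC with h | ⟨h, _⟩ <;> omega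
          refine ⟨hVv ▸ List.getElem_mem hjlt', ?_, ?_⟩
          · intro w hw
            obtain ⟨i, hi, rfl⟩ := List.mem_iff_getElem.mp hw
            rw [hVd]
            rcases Nat.lt_or_ge i j with h | h
            · have := hbelow i hi h; omega
            · exact hablow i hi h
          · intro w hw hwne htie
            obtain ⟨i, hi, rfl⟩ := List.mem_iff_getElem.mp hw
            rw [hVd] at htie
            rcases Nat.lt_or_ge i j with h | h
            · -- w is below s: it must be vals[j-1] with an exact tie
              have habs : |s - vals[i]| = s - vals[i] :=
                abs_of_nonneg (by have := hjlt i hi h; omega)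
              have h1 : s - vals[j - 1] ≤ s - vals[i] := by
                have := hbelow i hi h; omega
              have h2 : vals[i] = vals[j - 1] := by omega
              have hidx : pvFirst vs vals[i] = pvFirst vs vals[j - 1] := congrArg _ h2
              rw [hVv, hidx]
              rcases hC with hc | ⟨hceq, hclt⟩
              · omega
              · omega
            · -- w is above s: it must equal vals[j] = V, impossible
              have habs : |s - vals[i]| = vals[i] - s :=
                by rw [abs_sub_comm]; exact abs_of_nonneg (by have := hjge i hi h; omega)
              have h2 : vals[i] = vals[j] := by
                rcases Nat.eq_or_lt_of_le h with h' | h'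
                · subst h'; rfl
                · have := hm j i hjlt' hi h'; omega
              have : i = j := hinj i j hi hjlt' h2
              subst this
              exact absurd hVv.symm hwne
        · have hVv : V = vals[j - 1] := by rw [hV, if_neg hj0, if_neg hjn, if_neg hC, hgb]
          rw [hga, hgb, hfia, hfib] at hC
          push_neg at hC
          obtain ⟨hC1, hC2⟩ := hC
          have hVd : |s - V| = s - vals[j - 1] := by
            rw [hVv, abs_of_nonneg (by omega)]
          refine ⟨hVv ▸ List.getElem_mem hj1, ?_, ?_⟩
          · intro w hw
            obtain ⟨i, hi, rfl⟩ := List.mem_iff_getElem.mp hw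
            rw [hVd]
            rcases Nat.lt_or_ge i j with h | h
            · exact hbelow i hi h
            · have := hablow i hi h; omega
          · intro w hw hwne htie
            obtain ⟨i, hi, rfl⟩ := List.mem_iff_getElem.mp hw
            rw [hVd] at htie
            rcases Nat.lt_or_ge i j with h | h
            · have habs : |s - vals[i]| = s - vals[i] :=
                abs_of_nonneg (by have := hjlt i hi h; omega)
              have h2 : vals[i] = vals[j - 1] := by omega
              have : i = j - 1 := hinj i (j - 1) hi hj1 h2
              subst this
              exact absurd hVv.symm hwne
            · have habs : |s - vals[i]| = vals[i] - s :=
                by rw [abs_sub_comm]; exact abs_of_nonneg (by have := hjge i hi h; omega)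
              have hge2 : vals[j] - s ≤ vals[i] - s := by have := hablow i hi h; omega
              have h2 : vals[i] = vals[j] := by omega
              have hidx : pvFirst vs vals[i] = pvFirst vs vals[j] := congrArg _ h2
              have heq : vals[j] - s = s - vals[j - 1] := by omega
              have hfb := hC2 heq
              rw [hVv, hidx]
              omega
  obtain ⟨hVvals, hVmin, hVtie⟩ := hkey
  have hVvs : V ∈ vs := (hvmem V).mp hVvals
  obtain ⟨hplt, hpget, hpfirst⟩ := pvFirst_spec hVvs
  have hgd : (fi.getD V 0).toNat = pvFirst vs V := by
    rw [hfi V hVvs]; exact Int.toNat_natCast _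
  rw [hgd]
  refine ⟨hplt, ?_, ?_⟩
  · intro k hk
    rw [hpget]
    exact hVmin _ ((hvmem _).mpr (List.getElem_mem hk))
  · intro k hk hkp
    rw [hpget]
    by_cases hwv : vs[k] = V
    · exact absurd (pvFirst_le hk hwv) (by omega)
    · have hle : |s - V| ≤ |s - vs[k]| := hVmin _ ((hvmem _).mpr (List.getElem_mem hk))
      rcases eq_or_lt_of_le hle with heq | hlt
      · have := hVtie _ ((hvmem _).mpr (List.getElem_mem hk)) hwv heq.symm
        have := pvFirst_le hk rfl
        omega
      · exact hlt

lemma pvMap_modify_val (ts : List (Int × Int × (List (Int × Int)))) (p : Nat) (sub : Int × Int) :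
    (ts.modify p (fun t => (t.1, t.2.1, t.2.2 ++ [sub]))).map pvVal = ts.map pvVal := by
  induction ts generalizing p with
  | nil => simp
  | cons x l ih =>
    cases p with
    | zero => simp [List.modify, pvVal]
    | succ n => simpa [List.modify_cons] using ih n

lemma pvFold_eq (teams : List (Int × Int × (List (Int × Int)))) (fi : PySem.Dict Int Int)
    (vals : List Int) (hne : teams ≠ [])
    (hsort : vals.Pairwise (· < ·))
    (hvmem : ∀ w, w ∈ vals ↔ w ∈ teams.map pvVal)
    (hfi : ∀ w ∈ teams.map pvVal, fi.getD w 0 = ((pvFirst (teams.map pvVal) w : Nat) : Int)) :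
    ∀ (subs : List (Int × Int)) (ts : List (Int × Int × (List (Int × Int)))),
      ts.map pvVal = teams.map pvVal →
      subs.foldl (fun ts sub =>
        ts.modify (pvPickA sub.2 ts) (fun t => (t.1, t.2.1, t.2.2 ++ [sub]))) ts =
      subs.foldl (fun ts sub =>
        ts.modify (pvPickB fi vals sub.2) (fun t => (t.1, t.2.1, t.2.2 ++ [sub]))) ts := by
  intro subs
  induction subs with
  | nil => intro ts _; rfl
  | cons sub subs ih =>
    intro ts hmap
    simp only [List.foldl_cons]
    have htsne : ts ≠ [] := by
      intro h
      apply hne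
      have := hmap
      rw [h] at this
      exact List.map_eq_nil_iff.mp this.symm
    have hvsne : teams.map pvVal ≠ [] := by
      simpa using hne
    have hA := pvPickA_isPick sub.2 ts htsne
    rw [hmap] at hA
    have hB := pvPickB_spec fi vals (teams.map pvVal) sub.2 hsort hvmem hfi hvsne
    have hpick : pvPickA sub.2 ts = pvPickB fi vals sub.2 := pvIsPick_unique hA hB
    rw [hpick]
    exact ih _ (by rw [pvMap_modify_val, hmap])

-- ===== VERDICT (by name: the statement is the Claim_ definition above) =====
theorem add_subs_spec : Claim_equal_add_subs := by
  unfold Claim_equal_add_subs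
  intro teams sub_list _ hpre
  unfold Spec_add_subs add_subs add_subs_alt
  by_cases hne : teams = []
  · subst hne
    rcases hpre with h | h
    · exact absurd rfl h
    · subst h
      simp
  · rw [if_neg hne]
    have hmapeq : teams.map (fun t => t.2.1) = teams.map pvVal := rfl
    refine pvFold_eq teams _ _ hne ?_ ?_ ?_ sub_list teams rfl
    · exact PySem.List.sorted_ofList_pairwise_lt _
    · intro w
      rw [PySem.List.mem_sorted, PySem.Set.mem_ofList, hmapeq]
    · intro w hw
      have hb := pvBuildIdx teams 0 PySem.Dict.empty w
      rw [PySem.Dict.getD_eq_get?_getD, hb,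
        if_neg (by rw [PySem.Dict.contains_empty]; exact Bool.false_ne_true)]
      obtain ⟨k, hk⟩ := Option.isSome_iff_exists.mp ((PySem.List.index?_isSome_iff _ w).mpr hw)
      rw [hk]
      have hpf : pvFirst (teams.map pvVal) w = k := by unfold pvFirst; rw [hk]; rfl
      rw [hpf]
      simp
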